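-- pv_equiv track=rewrite | github.com/Divyansh-9/BlastRadius | tests/test_inference.py | parse_log_lines
-- ===== SOURCE A (Python) =====
-- from typing import List, Dict, Any
--
-- def parse_log_lines(output: str) -> Dict[str, List[str]]:
--     """Return dict with 'start', 'step', 'end' keys listing all matching lines."""
--     result: Dict[str, List[str]] = {"start": [], "step": [], "end": []}
--     for line in output.splitlines():
--         if line.startswith("[START]"):
--             result["start"].append(line)
--         elif line.startswith("[STEP]"):
--             result["step"].append(line)
--         elif line.startswith("[END]"):
--             result["end"].append(line)
--     return result
-- ===== SOURCE B (Python) =====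
-- def parse_log_lines(output: str):
--     """Return dict with 'start', 'step', 'end' keys listing all matching lines."""
--     lines = output.splitlines()
--     return {
--         "start": [l for l in lines if l.startswith("[START]")],
--         "step": [l for l in lines if l.startswith("[STEP]")],
--         "end": [l for l in lines if l.startswith("[END]")],
--     }
-- ===== Notes on version B (the rewrite author's own statement) =====
-- stated objective: simpler
-- what changed: Replaces A's single accumulating if/elif classification loop over mutable bucket lists with one splitlines call followed by three independent filtering comprehensions, one per prefix (correct because the three prefixes are mutually exclusive).
import Mathlib
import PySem

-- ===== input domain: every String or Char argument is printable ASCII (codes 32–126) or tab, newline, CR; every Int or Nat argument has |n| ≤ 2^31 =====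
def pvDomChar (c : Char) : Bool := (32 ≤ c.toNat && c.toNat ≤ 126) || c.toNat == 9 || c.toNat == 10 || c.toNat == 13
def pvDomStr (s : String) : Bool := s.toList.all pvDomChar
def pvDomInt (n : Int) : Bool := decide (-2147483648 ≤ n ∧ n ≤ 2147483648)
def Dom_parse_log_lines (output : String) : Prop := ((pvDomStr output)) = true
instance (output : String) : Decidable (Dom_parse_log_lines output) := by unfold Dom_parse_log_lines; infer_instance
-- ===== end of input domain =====

-- B replaces A's single if/elif classifying loop with three independent filter passes; objective: simpler.

-- ===== PORT A =====
def parse_log_lines (output : String) : List (String × List String) :=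
  let result : PySem.Dict String (List String) :=
    ((PySem.Dict.empty.insert "start" []).insert "step" []).insert "end" []
  ((PySem.Str.splitlines output).foldl (fun d line =>
    if PySem.Str.startswith line "[START]" then d.modify "start" [] (· ++ [line])
    else if PySem.Str.startswith line "[STEP]" then d.modify "step" [] (· ++ [line])
    else if PySem.Str.startswith line "[END]" then d.modify "end" [] (· ++ [line])
    else d) result).items

-- ===== PORT B =====
def parse_log_lines_alt (output : String) : List (String × List String) :=
  let lines := PySem.Str.splitlines output
  [("start", lines.filter (fun l => PySem.Str.startswith l "[START]")),
   ("step",  lines.filter (fun l => PySem.Str.startswith l "[STEP]")),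
   ("end",   lines.filter (fun l => PySem.Str.startswith l "[END]"))]

-- ===== PRECONDITION & SPEC =====
def Spec_parse_log_lines (output : String) (out : List (String × List String)) : Prop := out = parse_log_lines_alt output
instance (output : String) (out : List (String × List String)) : Decidable (Spec_parse_log_lines output out) := by unfold Spec_parse_log_lines; infer_instance

-- ===== CLAIM (what is proved, stated in full; the proofs are below) =====
def Claim_equal_parse_log_lines : Prop := ∀ (output : String), Dom_parse_log_lines output → Spec_parse_log_lines output (parse_log_lines output)

-- ===== LEMMAS AND PROOFS =====

-- the three prefixes are mutually exclusive
lemma not_step_of_start {l : String} (h : PySem.Str.startswith l "[START]" = true) :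
    PySem.Str.startswith l "[STEP]" = false := by
  by_contra hc
  rw [Bool.not_eq_false] at hc
  rw [PySem.Str.startswith_eq] at h hc
  rw [PySem.Chars.startswith_iff] at h hc
  obtain ⟨t1, h1⟩ := h
  obtain ⟨t2, h2⟩ := hc
  rw [← h1] at h2
  simp at h2

lemma not_end_of_start {l : String} (h : PySem.Str.startswith l "[START]" = true) :
    PySem.Str.startswith l "[END]" = false := by
  by_contra hc
  rw [Bool.not_eq_false] at hc
  rw [PySem.Str.startswith_eq] at h hc
  rw [PySem.Chars.startswith_iff] at h hc
  obtain ⟨t1, h1⟩ := h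
  obtain ⟨t2, h2⟩ := hc
  rw [← h1] at h2
  simp at h2

lemma not_end_of_step {l : String} (h : PySem.Str.startswith l "[STEP]" = true) :
    PySem.Str.startswith l "[END]" = false := by
  by_contra hc
  rw [Bool.not_eq_false] at hc
  rw [PySem.Str.startswith_eq] at h hc
  rw [PySem.Chars.startswith_iff] at h hc
  obtain ⟨t1, h1⟩ := h
  obtain ⟨t2, h2⟩ := hc
  rw [← h1] at h2
  simp at h2

lemma modify_start (a b c : List String) (l : String) :
    (PySem.Dict.mk [("start", a), ("step", b), ("end", c)]).modify "start" [] (· ++ [l])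
    = PySem.Dict.mk [("start", a ++ [l]), ("step", b), ("end", c)] := by
  simp [PySem.Dict.modify, PySem.Dict.getD, PySem.Dict.get?, PySem.Dict.insert, PySem.Dict.contains]

lemma modify_step (a b c : List String) (l : String) :
    (PySem.Dict.mk [("start", a), ("step", b), ("end", c)]).modify "step" [] (· ++ [l])
    = PySem.Dict.mk [("start", a), ("step", b ++ [l]), ("end", c)] := by
  simp [PySem.Dict.modify, PySem.Dict.getD, PySem.Dict.get?, PySem.Dict.insert, PySem.Dict.contains]

lemma modify_end (a b c : List String) (l : String) :
    (PySem.Dict.mk [("start", a), ("step", b), ("end", c)]).modify "end" [] (· ++ [l])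
    = PySem.Dict.mk [("start", a), ("step", b), ("end", c ++ [l])] := by
  simp [PySem.Dict.modify, PySem.Dict.getD, PySem.Dict.get?, PySem.Dict.insert, PySem.Dict.contains]

lemma loop_inv (lines : List String) (a b c : List String) :
    (lines.foldl (fun d line =>
      if PySem.Str.startswith line "[START]" then d.modify "start" [] (· ++ [line])
      else if PySem.Str.startswith line "[STEP]" then d.modify "step" [] (· ++ [line])
      else if PySem.Str.startswith line "[END]" then d.modify "end" [] (· ++ [line])
      else d) (PySem.Dict.mk [("start", a), ("step", b), ("end", c)])).items
    = [("start", a ++ lines.filter (fun l => PySem.Str.startswith l "[START]")),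
       ("step",  b ++ lines.filter (fun l => PySem.Str.startswith l "[STEP]")),
       ("end",   c ++ lines.filter (fun l => PySem.Str.startswith l "[END]"))] := by
  induction lines generalizing a b c with
  | nil => simp
  | cons l ls ih =>
    rw [List.foldl_cons]
    by_cases h1 : PySem.Str.startswith l "[START]" = true
    · have h2 := not_step_of_start h1
      have h3 := not_end_of_start h1
      rw [if_pos h1, modify_start, ih]
      simp only [List.filter_cons, h1, h2, h3, if_true]; simp
    · by_cases h2 : PySem.Str.startswith l "[STEP]" = true
      · have h3 := not_end_of_step h2
        rw [if_neg h1, if_pos h2, modify_step, ih]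
        simp only [List.filter_cons, h1, h2, h3, if_true]; simp
      · by_cases h3 : PySem.Str.startswith l "[END]" = true
        · rw [if_neg h1, if_neg h2, if_pos h3, modify_end, ih]
          simp only [List.filter_cons, h1, h2, h3]; simp
        · rw [if_neg h1, if_neg h2, if_neg h3, ih]
          simp only [List.filter_cons, h1, h2, h3]; simp

-- ===== VERDICT (by name: the statement is the Claim_ definition above) =====
theorem parse_log_lines_spec : Claim_equal_parse_log_lines := by
  intro output _
  unfold Spec_parse_log_lines parse_log_lines parse_log_lines_alt
  have hinit : ((PySem.Dict.empty.insert "start" ([] : List String)).insert "step" []).insert "end" []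
      = PySem.Dict.mk [("start", []), ("step", []), ("end", [])] := by decide
  rw [hinit]
  simpa using loop_inv (PySem.Str.splitlines output) [] [] []
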